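-- pv_equiv track=rewrite | github.com/DedRobin/codewars | Python/8pyu/Count of positives sum of negatives.py | count_positives_sum_negatives
-- ===== SOURCE A (Python) =====
-- def count_positives_sum_negatives(arr):
--     if not arr:
--         return []
--     else:
--         positives = 0
--         sum_negatives = 0
--         for i in arr:
--             if i > 0:
--                 positives += 1
--             if i < 0:
--                 sum_negatives += i
--         return [positives, sum_negatives]
-- ===== SOURCE B (Python) =====
-- def count_positives_sum_negatives(arr):
--     if not arr:
--         return []
--     s = sorted(arr)
--     n = len(s)
--     # binary search: first index with s[i] >= 0
--     lo, hi = 0, n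
--     while lo < hi:
--         mid = (lo + hi) // 2
--         if s[mid] < 0:
--             lo = mid + 1
--         else:
--             hi = mid
--     neg_end = lo
--     # binary search: first index with s[i] > 0
--     lo, hi = neg_end, n
--     while lo < hi:
--         mid = (lo + hi) // 2
--         if s[mid] <= 0:
--             lo = mid + 1
--         else:
--             hi = mid
--     return [n - lo, sum(s[:neg_end])]
-- ===== Notes on version B (the rewrite author's own statement) =====
-- stated objective: alternative
-- what changed: Sorts the array, locates the negative/zero/positive boundaries with two hand-written binary searches, counts positives as the suffix length past the last non-positive, and sums the negative prefix slice; correct because the count and the sum are invariant under reordering.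
import Mathlib
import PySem

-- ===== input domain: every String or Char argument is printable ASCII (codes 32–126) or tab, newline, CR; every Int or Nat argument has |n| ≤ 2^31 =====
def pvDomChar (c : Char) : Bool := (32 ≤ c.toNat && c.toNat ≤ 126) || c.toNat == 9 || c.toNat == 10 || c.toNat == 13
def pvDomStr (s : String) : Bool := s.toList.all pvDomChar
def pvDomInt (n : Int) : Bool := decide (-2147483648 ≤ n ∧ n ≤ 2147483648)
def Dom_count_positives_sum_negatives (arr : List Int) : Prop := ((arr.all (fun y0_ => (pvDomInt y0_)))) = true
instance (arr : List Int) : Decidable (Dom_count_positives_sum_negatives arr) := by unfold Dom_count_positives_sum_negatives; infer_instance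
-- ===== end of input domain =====

-- B sorts the array and finds the negative/positive boundaries by binary search instead of scanning with accumulators (alternative algorithm; not faster).
-- ===== PORT A =====
-- Port of A: single loop carrying both accumulators.
def count_positives_sum_negatives (arr : List Int) : List Int :=
  if arr = [] then []
  else
    let st := arr.foldl (fun (acc : Int × Int) i =>
      let acc := if i > 0 then (acc.1 + 1, acc.2) else acc
      if i < 0 then (acc.1, acc.2 + i) else acc) (0, 0)
    [st.1, st.2]

-- ===== PORT B =====
-- Port of B's while loop: binary search, first index in [lo,hi) where p fails (indices stay in range, so getD is exact for s[mid]).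
def cpsnBS (s : List Int) (p : Int → Bool) (lo hi : Nat) : Nat :=
  if lo < hi then
    let mid := (lo + hi) / 2
    if p (s.getD mid 0) then cpsnBS s p (mid + 1) hi else cpsnBS s p lo mid
  else lo
termination_by hi - lo
decreasing_by all_goals omega

-- Port of B: sort, two binary searches, suffix count and prefix-slice sum.
def count_positives_sum_negatives_alt (arr : List Int) : List Int :=
  if arr = [] then []
  else
    let s := PySem.List.sorted arr (fun x => x) false
    let n := s.length
    let negEnd := cpsnBS s (fun x => decide (x < 0)) 0 n
    let posStart := cpsnBS s (fun x => decide (x ≤ 0)) negEnd n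
    [(n : Int) - (posStart : Int), (PySem.List.slice s none (some (negEnd : Int))).sum]

-- ===== PRECONDITION & SPEC =====
def Spec_count_positives_sum_negatives (arr : List Int) (out : List Int) : Prop := out = count_positives_sum_negatives_alt arr
instance (arr : List Int) (out : List Int) : Decidable (Spec_count_positives_sum_negatives arr out) := by unfold Spec_count_positives_sum_negatives; infer_instance

-- ===== CLAIM =====
def Claim_equal_count_positives_sum_negatives : Prop := ∀ (arr : List Int), Dom_count_positives_sum_negatives arr → Spec_count_positives_sum_negatives arr (count_positives_sum_negatives arr)

-- ===== LEMMAS AND PROOFS =====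

-- A's fold computes (count of positives, sum of negatives).
lemma cpsn_fold (arr : List Int) (p n : Int) :
    arr.foldl (fun (acc : Int × Int) i =>
      let acc := if i > 0 then (acc.1 + 1, acc.2) else acc
      if i < 0 then (acc.1, acc.2 + i) else acc) (p, n)
    = (p + (arr.countP (fun x => decide (0 < x)) : Int),
       n + (arr.filter (fun x => decide (x < 0))).sum) := by
  induction arr generalizing p n with
  | nil => simp
  | cons x xs ih =>
    simp only [List.foldl_cons, List.countP_cons, List.filter_cons]
    by_cases hp : x > 0 <;> by_cases hn : x < 0 <;>
      simp [hp, hn, ih]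
    all_goals try (push_cast; ring)
    all_goals exact ⟨trivial, trivial⟩

-- Binary-search invariant: for an index-downward-closed predicate, if p holds below lo
-- and fails from hi on, the result r has p true strictly below r and false from r on.
lemma cpsnBS_inv (s : List Int) (p : Int → Bool)
    (hmono : ∀ i j : Nat, i ≤ j → j < s.length →
      p (s.getD j 0) = true → p (s.getD i 0) = true) :
    ∀ (k lo hi : Nat), hi - lo = k → lo ≤ hi → hi ≤ s.length →
    (∀ i, i < lo → p (s.getD i 0) = true) →
    (∀ i, hi ≤ i → i < s.length → p (s.getD i 0) = false) →
    lo ≤ cpsnBS s p lo hi ∧ cpsnBS s p lo hi ≤ hi ∧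
    (∀ i, i < cpsnBS s p lo hi → p (s.getD i 0) = true) ∧
    (∀ i, cpsnBS s p lo hi ≤ i → i < s.length → p (s.getD i 0) = false) := by
  intro k
  induction k using Nat.strong_induction_on with
  | _ k ih =>
    intro lo hi hk hle hlen hlo hhi
    unfold cpsnBS
    by_cases h : lo < hi
    · simp only [h, if_true]
      by_cases hp : p (s.getD ((lo + hi) / 2) 0) = true
      · simp only [hp, if_true]
        have hres := ih (hi - ((lo + hi) / 2 + 1)) (by omega) ((lo + hi) / 2 + 1) hi rfl
          (by omega) hlen
          (fun i hi' => hmono i ((lo + hi) / 2) (by omega) (by omega) hp)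
          hhi
        exact ⟨by omega, hres.2.1, hres.2.2.1, hres.2.2.2⟩
      · rw [Bool.not_eq_true] at hp
        simp only [hp, Bool.false_eq_true, if_false]
        have hfail : ∀ i, (lo + hi) / 2 ≤ i → i < s.length → p (s.getD i 0) = false := by
          intro i h1 h2
          by_contra hc
          have := hmono ((lo + hi) / 2) i h1 h2 (by simpa using hc)
          rw [hp] at this; exact Bool.false_ne_true this
        have hres := ih ((lo + hi) / 2 - lo) (by omega) lo ((lo + hi) / 2) rfl
          (by omega) (by omega) hlo hfail
        exact ⟨hres.1, by omega, hres.2.2.1, hres.2.2.2⟩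
    · simp only [h, if_false]
      exact ⟨le_refl _, by omega, hlo, fun i h1 h2 => hhi i (by omega) h2⟩

-- A boundary r (p true below r, false from r on, r ≤ length) equals countP p.
lemma boundary_countP (s : List Int) (p : Int → Bool) (r : Nat) (hr : r ≤ s.length)
    (h1 : ∀ i, i < r → p (s.getD i 0) = true)
    (h2 : ∀ i, r ≤ i → i < s.length → p (s.getD i 0) = false) :
    s.countP p = r := by
  have hsplit : s = s.take r ++ s.drop r := (List.take_append_drop r s).symm
  have htake : (s.take r).countP p = r := by
    have hall : ∀ x ∈ s.take r, p x = true := by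
      intro x hx
      obtain ⟨i, hilen, hget⟩ := List.getElem_of_mem hx
      have hi' : i < r := by
        have := (List.length_take ..).symm ▸ hilen; omega
      have : (s.take r)[i] = s[i]'(by omega) := List.getElem_take ..
      have hgd : s.getD i 0 = x := by
        rw [List.getD_eq_getElem s 0 (by omega)]
        rw [this] at hget; exact hget
      rw [← hgd]; exact h1 i hi'
    rw [List.countP_eq_length.mpr hall, List.length_take]; omega
  have hdrop : (s.drop r).countP p = 0 := by
    apply List.countP_eq_zero.mpr
    intro x hx
    obtain ⟨i, hilen, hget⟩ := List.getElem_of_mem hx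
    have hlen' : i + r < s.length := by
      have := (List.length_drop ..).symm ▸ hilen; omega
    have : (s.drop r)[i] = s[r + i]'(by omega) := List.getElem_drop ..
    have hgd : s.getD (r + i) 0 = x := by
      rw [List.getD_eq_getElem s 0 (by omega)]
      rw [this] at hget; exact hget
    have hval := h2 (r + i) (by omega) (by omega)
    rw [hgd] at hval
    simp [hval]
  calc s.countP p = (s.take r ++ s.drop r).countP p := by rw [← hsplit]
    _ = r := by rw [List.countP_append, htake, hdrop]; omega

-- The prefix cut at such a boundary for (· < 0) is exactly the negative elements.
lemma boundary_take_eq_filter (s : List Int) (r : Nat) (hr : r ≤ s.length)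
    (h1 : ∀ i, i < r → (decide ((s.getD i 0) < 0)) = true)
    (h2 : ∀ i, r ≤ i → i < s.length → (decide ((s.getD i 0) < 0)) = false) :
    s.take r = s.filter (fun x => decide (x < 0)) := by
  have hsplit : s = s.take r ++ s.drop r := (List.take_append_drop r s).symm
  have htake : (s.take r).filter (fun x => decide (x < 0)) = s.take r := by
    apply List.filter_eq_self.mpr
    intro x hx
    obtain ⟨i, hilen, hget⟩ := List.getElem_of_mem hx
    have hi' : i < r := by have := (List.length_take ..).symm ▸ hilen; omega
    have : (s.take r)[i] = s[i]'(by omega) := List.getElem_take ..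
    have hgd : s.getD i 0 = x := by
      rw [List.getD_eq_getElem s 0 (by omega)]; rw [this] at hget; exact hget
    rw [← hgd]; exact h1 i hi'
  have hdrop : (s.drop r).filter (fun x => decide (x < 0)) = [] := by
    apply List.filter_eq_nil_iff.mpr
    intro x hx
    obtain ⟨i, hilen, hget⟩ := List.getElem_of_mem hx
    have hlen' : i + r < s.length := by have := (List.length_drop ..).symm ▸ hilen; omega
    have : (s.drop r)[i] = s[r + i]'(by omega) := List.getElem_drop ..
    have hgd : s.getD (r + i) 0 = x := by
      rw [List.getD_eq_getElem s 0 (by omega)]; rw [this] at hget; exact hget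
    have := h2 (r + i) (by omega) (by omega)
    rw [hgd] at this; simpa using this
  calc s.take r = (s.take r).filter (fun x => decide (x < 0)) := htake.symm
    _ = (s.take r ++ s.drop r).filter (fun x => decide (x < 0)) := by
        rw [List.filter_append, hdrop, List.append_nil]
    _ = s.filter (fun x => decide (x < 0)) := by rw [← hsplit]

-- Sortedness gives index-downward-closedness for (· < c)-style predicates.
lemma sorted_mono (arr : List Int) (p : Int → Bool)
    (hdc : ∀ a b : Int, a ≤ b → p b = true → p a = true) :
    ∀ i j : Nat, i ≤ j → j < (PySem.List.sorted arr (fun x => x) false).length →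
      p ((PySem.List.sorted arr (fun x => x) false).getD j 0) = true →
      p ((PySem.List.sorted arr (fun x => x) false).getD i 0) = true := by
  intro i j hij hj hp
  have hle := PySem.List.sorted_id_getElem_mono (xs := arr) (p := i) (q := j) hij hj
  rw [List.getD_eq_getElem _ 0 hj] at hp
  rw [List.getD_eq_getElem _ 0 (by omega)]
  exact hdc _ _ hle hp

-- ===== VERDICT =====
theorem count_positives_sum_negatives_spec : Claim_equal_count_positives_sum_negatives := by
  intro arr _
  unfold Spec_count_positives_sum_negatives count_positives_sum_negatives count_positives_sum_negatives_alt
  by_cases h : arr = []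
  · simp [h]
  · simp only [h, if_false, cpsn_fold]
    set s := PySem.List.sorted arr (fun x => x) false with hs
    have hperm : s.Perm arr := PySem.List.sorted_perm ..
    -- first binary search: boundary of (· < 0)
    have hmono1 := sorted_mono arr (fun x => decide (x < 0)) (by intro a b hab hb; simp at *; omega)
    rw [← hs] at hmono1
    have hinv1 := cpsnBS_inv s (fun x => decide (x < 0)) hmono1 s.length 0 s.length rfl (by omega) (le_refl _)
      (by intro i hi; omega) (by intro i h1 h2; omega)
    set negEnd := cpsnBS s (fun x => decide (x < 0)) 0 s.length with hne
    -- second binary search: boundary of (· ≤ 0)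
    have hmono2 := sorted_mono arr (fun x => decide (x ≤ 0)) (by intro a b hab hb; simp at *; omega)
    have hlo2 : ∀ i, i < negEnd → (decide ((s.getD i 0) ≤ 0)) = true := by
      intro i hi
      have := hinv1.2.2.1 i hi
      simp at this ⊢; omega
    rw [← hs] at hmono2
    have hinv2 := cpsnBS_inv s (fun x => decide (x ≤ 0)) hmono2 (s.length - negEnd) negEnd s.length rfl
      hinv1.2.1 (le_refl _) hlo2 (by intro i h1 h2; omega)
    set posStart := cpsnBS s (fun x => decide (x ≤ 0)) negEnd s.length with hps
    -- characterise the two boundaries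
    have hcount2 : s.countP (fun x => decide (x ≤ 0)) = posStart :=
      boundary_countP s _ posStart hinv2.2.1 hinv2.2.2.1 hinv2.2.2.2
    have htake : s.take negEnd = s.filter (fun x => decide (x < 0)) :=
      boundary_take_eq_filter s negEnd hinv1.2.1 hinv1.2.2.1 hinv1.2.2.2
    -- positives count: n - posStart = countP (0 < ·) arr
    have hpartition : s.countP (fun x => decide (0 < x)) + s.countP (fun x => decide (x ≤ 0)) = s.length := by
      have := List.length_eq_countP_add_countP (l := s) (p := fun x => decide (0 < x))
      have hnot : s.countP (fun x => ¬ decide (0 < x)) = s.countP (fun x => decide (x ≤ 0)) := by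
        apply List.countP_congr; intro x _; simp; try omega
      omega
    have hcpos : s.countP (fun x => decide (0 < x)) = arr.countP (fun x => decide (0 < x)) :=
      hperm.countP_eq _
    -- sum of negatives
    have hsum : (PySem.List.slice s none (some (negEnd : Int))).sum
        = (arr.filter (fun x => decide (x < 0))).sum := by
      rw [PySem.List.slice_to_natCast, htake]
      exact ((hperm.filter _).sum_eq)
    have hfin : (arr.countP (fun x => decide (0 < x)) : Int)
        = (s.length : Int) - (posStart : Int) := by
      rw [← hcpos]
      have h1 := hinv2.2.1
      omega
    simp only [zero_add]
    rw [hfin, hsum]
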